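-- pv_equiv track=rewrite | github.com/vladpopescu976-collab/backendtryclothes | app/services/stylist.py | _localize_size_reason
-- ===== SOURCE A (Python) =====
-- def _localize_size_reason(reason: str, language: str) -> str:
--     if language == "en":
--         return reason
--
--     replacements = {
--         "Chest": "Bust",
--         "Waist": "Talie",
--         "Hips": "Șolduri",
--         "Inseam": "Lungime interioară",
--         "No body profile measurements saved.": "Nu există măsurători salvate în profilul corporal.",
--         "No matching size chart entries found.": "Nu am găsit intrări compatibile în size chart.",
--     }
--     translated = reason
--     for source, target in replacements.items():
--         translated = translated.replace(source, target)
--     return translated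
-- ===== SOURCE B (Python) =====
-- def _localize_size_reason(reason: str, language: str) -> str:
--     if language == "en":
--         return reason
--
--     replacements = {
--         "Chest": "Bust",
--         "Waist": "Talie",
--         "Hips": "Șolduri",
--         "Inseam": "Lungime interioară",
--         "No body profile measurements saved.": "Nu există măsurători salvate în profilul corporal.",
--         "No matching size chart entries found.": "Nu am găsit intrări compatibile în size chart.",
--     }
--     # Single left-to-right pass: at each position substitute the first
--     # matching key (instead of six whole-string replace passes).
--     out = []
--     i = 0
--     n = len(reason)
--     while i < n:
--         for source, target in replacements.items():
--             if reason.startswith(source, i):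
--                 out.append(target)
--                 i += len(source)
--                 break
--         else:
--             out.append(reason[i])
--             i += 1
--     return "".join(out)
-- ===== Notes on version B (the rewrite author's own statement) =====
-- stated objective: alternative
-- what changed: B replaces A's six sequential whole-string str.replace passes by one left-to-right scan that substitutes the first matching table key at each position (simultaneous single-pass substitution); equivalence rests on proved non-overlap of keys and targets.
import Mathlib
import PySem

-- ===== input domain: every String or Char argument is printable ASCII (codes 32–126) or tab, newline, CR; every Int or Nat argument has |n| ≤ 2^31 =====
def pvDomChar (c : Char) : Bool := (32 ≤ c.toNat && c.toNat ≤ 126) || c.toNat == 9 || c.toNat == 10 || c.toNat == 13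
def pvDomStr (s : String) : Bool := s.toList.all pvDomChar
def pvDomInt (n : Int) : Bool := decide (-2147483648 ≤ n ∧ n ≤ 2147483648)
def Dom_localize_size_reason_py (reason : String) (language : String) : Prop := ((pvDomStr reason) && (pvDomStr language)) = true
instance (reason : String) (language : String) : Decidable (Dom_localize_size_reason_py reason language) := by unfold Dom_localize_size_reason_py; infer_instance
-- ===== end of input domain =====

-- B replaces A's six sequential whole-string `replace` passes by ONE left-to-right scan that
-- substitutes the first matching key at each position (objective: alternative single-pass algorithm).

-- ===== PORT A =====
-- literal transliteration of A: guard on "en", then six sequential str.replace passes in dict order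
def localize_size_reason_py (reason : String) (language : String) : String :=
  if language == "en" then reason
  else
    let t := reason
    let t := PySem.Str.replace t "Chest" "Bust"
    let t := PySem.Str.replace t "Waist" "Talie"
    let t := PySem.Str.replace t "Hips" "Șolduri"
    let t := PySem.Str.replace t "Inseam" "Lungime interioară"
    let t := PySem.Str.replace t "No body profile measurements saved." "Nu există măsurători salvate în profilul corporal."
    let t := PySem.Str.replace t "No matching size chart entries found." "Nu am găsit intrări compatibile în size chart."
    t

-- ===== PORT B =====
-- B's replacement table, in insertion order
def pvTable : List (List Char × List Char) :=
  [ ("Chest".toList, "Bust".toList),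
    ("Waist".toList, "Talie".toList),
    ("Hips".toList, "Șolduri".toList),
    ("Inseam".toList, "Lungime interioară".toList),
    ("No body profile measurements saved.".toList, "Nu există măsurători salvate în profilul corporal.".toList),
    ("No matching size chart entries found.".toList, "Nu am găsit intrări compatibile în size chart.".toList) ]

-- B's single left-to-right pass: at each position, the first table key that matches
-- (reason.startswith(key, i)) is substituted and the scan jumps past it; otherwise the
-- character is copied.  (The while/for-else loop of Source B, by hand; keys are nonempty.)
def pvSub (ps : List (List Char × List Char)) : List Char → List Char
  | [] => []
  | c :: cs =>
    match ps.find? (fun p => p.1.isPrefixOf (c :: cs)) with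
    | some (k, t) => t ++ pvSub ps (cs.drop (k.length - 1))
    | none => c :: pvSub ps cs
termination_by s => s.length
decreasing_by all_goals (simp; try omega)

def localize_size_reason_py_alt (reason : String) (language : String) : String :=
  if language == "en" then reason
  else String.ofList (pvSub pvTable reason.toList)

-- ===== PRECONDITION & SPEC =====
def Spec_localize_size_reason_py (reason : String) (language : String) (out : String) : Prop := out = localize_size_reason_py_alt reason language
instance (reason : String) (language : String) (out : String) : Decidable (Spec_localize_size_reason_py reason language out) := by unfold Spec_localize_size_reason_py; infer_instance

-- ===== CLAIM (what is proved, stated in full; the proofs are below) =====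
def Claim_equal_localize_size_reason_py : Prop := ∀ (reason : String) (language : String), Dom_localize_size_reason_py reason language → Spec_localize_size_reason_py reason language (localize_size_reason_py reason language)

-- ===== LEMMAS AND PROOFS =====

-- structural (well-founded) version of Python's str.replace scan
def pvRep (old new : List Char) : List Char → List Char
  | [] => []
  | c :: cs =>
    if old.isPrefixOf (c :: cs) then new ++ pvRep old new (cs.drop (old.length - 1))
    else c :: pvRep old new cs
termination_by s => s.length
decreasing_by all_goals (simp; try omega)

-- "u and v agree from the start" (one is a prefix of the other)
abbrev pvAgree (u v : List Char) : Prop := u <+: v ∨ v <+: u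

-- pvSub with an empty table is the identity
theorem pvSub_nil : ∀ s : List Char, pvSub [] s = s
  | [] => by rw [pvSub]
  | c :: cs => by rw [pvSub]; simp [pvSub_nil cs]

-- the fuel/accumulator scan of PySem.Chars.replace computes pvRep
theorem go_acc (old new : List Char) : ∀ (fuel : ℕ) (l acc : List Char),
    PySem.Chars.replace.go old new fuel l acc = acc.reverse ++ PySem.Chars.replace.go old new fuel l [] := by
  intro fuel
  induction fuel with
  | zero => intro l acc; simp [PySem.Chars.replace.go]
  | succ f ih =>
    intro l acc
    cases l with
    | nil => simp [PySem.Chars.replace.go]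
    | cons c cs =>
      rw [PySem.Chars.replace.go, PySem.Chars.replace.go]
      by_cases hp : old.isPrefixOf (c :: cs)
      · simp only [hp, if_true]
        rw [ih _ (new.reverse ++ acc), ih _ (new.reverse ++ [])]
        simp
      · simp only [hp, Bool.false_eq_true, if_false]
        rw [ih cs [c], ih cs (c :: acc)]
        simp

theorem go_eq_pvRep (old new : List Char) (hk : old ≠ []) : ∀ (fuel : ℕ) (l : List Char),
    l.length ≤ fuel → PySem.Chars.replace.go old new fuel l [] = pvRep old new l := by
  intro fuel
  induction fuel with
  | zero =>
    intro l hl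
    have : l = [] := List.length_eq_zero_iff.mp (Nat.le_zero.mp hl)
    subst this; simp [PySem.Chars.replace.go, pvRep]
  | succ f ih =>
    intro l hl
    cases l with
    | nil => simp [PySem.Chars.replace.go, pvRep]
    | cons c cs =>
      rw [PySem.Chars.replace.go, pvRep]
      by_cases hp : old.isPrefixOf (c :: cs)
      · simp only [hp, if_true]
        rw [go_acc]
        have hlen : old.length ≥ 1 := by
          cases old with
          | nil => exact absurd rfl hk
          | cons _ _ => simp
        have hdrop : (c :: cs).drop old.length = cs.drop (old.length - 1) := by
          cases old with
          | nil => exact absurd rfl hk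
          | cons _ _ => simp
        rw [hdrop]
        have : (cs.drop (old.length - 1)).length ≤ f := by
          simp at hl ⊢; omega
        rw [ih _ this]
        simp
      · simp only [hp, Bool.false_eq_true, if_false]
        rw [go_acc]
        have : cs.length ≤ f := by simp at hl; omega
        rw [ih _ this]
        simp

theorem replace_eq_pvRep (s old new : List Char) (hk : old ≠ []) :
    PySem.Chars.replace s old new = pvRep old new s := by
  rw [PySem.Chars.replace]
  have : old.isEmpty = false := by cases old <;> simp_all
  rw [this]
  simp only [Bool.false_eq_true, if_false]
  exact go_eq_pvRep old new hk s.length s le_rfl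

-- basic pvRep facts
theorem pvRep_nil (old new : List Char) : pvRep old new [] = [] := by rw [pvRep]

theorem pvRep_cons_neg (old new : List Char) (c : Char) (cs : List Char)
    (h : ¬ old <+: (c :: cs)) : pvRep old new (c :: cs) = c :: pvRep old new cs := by
  rw [pvRep]
  simp [(List.isPrefixOf_iff_prefix (l₁ := old)).not.mpr h]

theorem pvRep_pos (old new : List Char) (l : List Char) (hk : old ≠ []) (h : old <+: l) :
    pvRep old new l = new ++ pvRep old new (l.drop old.length) := by
  cases l with
  | nil =>
    have := List.prefix_nil.mp h
    exact absurd this hk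
  | cons c cs =>
    rw [pvRep]
    have hb : old.isPrefixOf (c :: cs) = true := List.isPrefixOf_iff_prefix.mpr h
    rw [hb]
    simp only [if_true]
    have hdrop : (c :: cs).drop old.length = cs.drop (old.length - 1) := by
      cases old with
      | nil => exact absurd rfl hk
      | cons _ _ => simp
    rw [hdrop]

-- skip lemma: no occurrence of old starts before n, so replace skips the first n chars
theorem pvRep_skip (old new : List Char) : ∀ (n : ℕ) (l : List Char), n ≤ l.length →
    (∀ q < n, ¬ old <+: l.drop q) → pvRep old new l = l.take n ++ pvRep old new (l.drop n) := by
  intro n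
  induction n with
  | zero => intro l _ _; simp
  | succ m ih =>
    intro l hl h
    cases l with
    | nil => simp at hl
    | cons c cs =>
      have h0 : ¬ old <+: (c :: cs) := by
        have := h 0 (Nat.succ_pos m); simpa using this
      rw [pvRep_cons_neg old new c cs h0]
      have hcs : m ≤ cs.length := by simp at hl; omega
      rw [ih cs hcs (fun q hq => by
        have := h (q + 1) (by omega)
        simpa using this)]
      simp

-- no occurrence at all: replace is the identity
theorem pvRep_id (old new : List Char) (l : List Char) (h : ∀ q, ¬ old <+: l.drop q) :
    pvRep old new l = l := by
  have := pvRep_skip old new l.length l le_rfl (fun q _ => h q)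
  simpa [pvRep_nil] using this

-- prefix of an append, short case
theorem prefix_append_short {k A B : List Char} (h : k <+: A ++ B) (hl : k.length ≤ A.length) :
    k <+: A := by
  have h1 := List.prefix_iff_eq_take.mp h
  rw [List.take_append_of_le_length hl] at h1
  rw [h1]
  exact List.take_prefix _ _

-- prefix of an append, long case
theorem prefix_append_long {k A B : List Char} (h : k <+: A ++ B) (hl : A.length ≤ k.length) :
    A <+: k ∧ k.drop A.length <+: B := by
  constructor
  · exact List.prefix_of_prefix_length_le (List.prefix_append A B) h hl
  · have hA : A <+: k := List.prefix_of_prefix_length_le (List.prefix_append A B) h hl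
    obtain ⟨w, hw⟩ := h
    obtain ⟨u, hu⟩ := hA
    refine ⟨w, ?_⟩
    have : k.drop A.length = u := by rw [← hu]; simp
    rw [this]
    have : A ++ (u ++ w) = A ++ B := by rw [← List.append_assoc, hu, hw]
    exact (List.append_cancel_left this)

-- occurrence preservation: if old does not match at the front, replacing old by new
-- neither creates nor destroys a front match of any separated key k'
theorem pvRep_prefix_iff (old new k' : List Char) (hk : old ≠ [])
    (hC2 : ∀ q, 1 ≤ q → q < k'.length → ¬ pvAgree old (k'.drop q))
    (hC3 : ∀ m, 1 ≤ m → m < k'.length → ¬ pvAgree new (k'.drop m))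
    (s : List Char) (hks : ¬ old <+: s) :
    (k' <+: pvRep old new s ↔ k' <+: s) := by
  constructor
  · intro h
    by_contra hns
    by_cases hocc : ∃ j, old <+: s.drop j
    · -- first occurrence m ≥ 1
      have hdec : DecidablePred (fun j => old <+: s.drop j) := fun j => inferInstance
      have m := Nat.find hocc
      have hm : old <+: s.drop (Nat.find hocc) := Nat.find_spec hocc
      have hmin : ∀ q < Nat.find hocc, ¬ old <+: s.drop q := fun q hq => Nat.find_min hocc hq
      set m := Nat.find hocc with hmdef
      have hm1 : 1 ≤ m := by
        rcases Nat.eq_zero_or_pos m with h0 | h1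
        · rw [h0] at hm; exact absurd hm hks
        · exact h1
      have hmlen : m ≤ s.length := by
        by_contra hgt
        push_neg at hgt
        rw [List.drop_eq_nil_of_le (le_of_lt hgt)] at hm
        exact hk (List.prefix_nil.mp hm)
      have hsplit : pvRep old new s = s.take m ++ (new ++ pvRep old new ((s.drop m).drop old.length)) := by
        rw [pvRep_skip old new m s hmlen hmin, pvRep_pos old new (s.drop m) hk hm]
      rw [hsplit] at h
      by_cases hlen : k'.length ≤ m
      · have htk : k' <+: s.take m := prefix_append_short h (by simp [List.length_take]; omega)
        exact hns (htk.trans (List.take_prefix m s))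
      · push_neg at hlen
        have hA : (s.take m).length = m := by simp [hmlen]
        have h2 := prefix_append_long h (by rw [hA]; omega)
        rw [hA] at h2
        obtain ⟨_, hdropPre⟩ := h2
        have hu1 : 1 ≤ k'.length - m + 0 := by omega
        by_cases hul : k'.length - m ≤ new.length
        · have : k'.drop m <+: new := prefix_append_short hdropPre (by simp; omega)
          exact hC3 m hm1 hlen (Or.inr this)
        · push_neg at hul
          have : new <+: k'.drop m :=
            List.prefix_of_prefix_length_le (List.prefix_append new _) hdropPre (by simp; omega)
          exact hC3 m hm1 hlen (Or.inl this)
    · push_neg at hocc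
      rw [pvRep_id old new s hocc] at h
      exact hns h
  · intro h
    have hlk : k'.length ≤ s.length := h.length_le
    have hnoocc : ∀ q < k'.length, ¬ old <+: s.drop q := by
      intro q hq
      rcases Nat.eq_zero_or_pos q with h0 | h1
      · rw [h0]; simpa using hks
      · intro habs
        obtain ⟨w, hw⟩ := h
        have hdq : s.drop q = k'.drop q ++ w := by
          rw [← hw, List.drop_append_of_le_length (le_of_lt hq)]
        rw [hdq] at habs
        by_cases hol : old.length ≤ k'.length - q
        · exact hC2 q h1 hq (Or.inl (prefix_append_short habs (by simp; omega)))
        · exact hC2 q h1 hq (Or.inr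
            (List.prefix_of_prefix_length_le (List.prefix_append _ _) habs (by simp; omega)))
    rw [pvRep_skip old new k'.length s hlk hnoocc]
    have : s.take k'.length = k' := (List.prefix_iff_eq_take.mp h).symm
    rw [this]
    exact List.prefix_append _ _

-- pvSub walks transparently over an inserted target t that no key can match into
theorem pvSub_target (ps : List (List Char × List Char)) :
    ∀ (t X : List Char),
    (∀ p ∈ ps, ∀ q < t.length, ¬ pvAgree p.1 (t.drop q)) →
    pvSub ps (t ++ X) = t ++ pvSub ps X := by
  intro t
  induction t with
  | nil => intro X _; simp
  | cons d t' ih =>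
    intro X hT
    have hnone : ps.find? (fun p => p.1.isPrefixOf (d :: (t' ++ X))) = none := by
      rw [List.find?_eq_none]
      intro p hp habs
      have hpre : p.1 <+: (d :: t') ++ X := List.isPrefixOf_iff_prefix.mp habs
      have h0 := hT p hp 0 (by simp)
      simp only [List.drop_zero] at h0
      by_cases hl : p.1.length ≤ (d :: t').length
      · exact h0 (Or.inl (prefix_append_short hpre hl))
      · exact h0 (Or.inr (List.prefix_of_prefix_length_le (List.prefix_append _ _) hpre (by omega)))
    have : (d :: t') ++ X = d :: (t' ++ X) := by simp
    rw [this, pvSub, hnone]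
    have hsh : ∀ p ∈ ps, ∀ q < t'.length, ¬ pvAgree p.1 (t'.drop q) := by
      intro p hp q hq
      have := hT p hp (q + 1) (by simpa using Nat.succ_lt_succ hq)
      simpa using this
    simp [ih X hsh]

-- congruence for find? under a pointwise-equal predicate
theorem find?_congr' {α : Type} (f g : α → Bool) : ∀ (l : List α), (∀ a ∈ l, f a = g a) →
    l.find? f = l.find? g
  | [], _ => rfl
  | a :: l, h => by
    rw [List.find?, List.find?, h a (by simp)]
    cases g a with
    | true => rfl
    | false => exact find?_congr' f g l (fun x hx => h x (by simp [hx]))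

-- MAIN STEP: one sequential replace pass absorbed into the simultaneous scan
theorem pvSub_absorb (k t : List Char) (rest : List (List Char × List Char)) (hk : k ≠ [])
    (hkr : ∀ p ∈ rest, p.1 ≠ [])
    (hT : ∀ p ∈ rest, ∀ q < t.length, ¬ pvAgree p.1 (t.drop q))
    (hC2 : ∀ p ∈ rest, ∀ q, 1 ≤ q → q < p.1.length → ¬ pvAgree k (p.1.drop q))
    (hC3 : ∀ p ∈ rest, ∀ m, 1 ≤ m → m < p.1.length → ¬ pvAgree t (p.1.drop m)) :
    ∀ s, pvSub rest (pvRep k t s) = pvSub ((k, t) :: rest) s := by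
  intro s
  induction hn : s.length using Nat.strong_induction_on generalizing s with
  | _ n IH =>
  cases s with
  | nil => simp [pvRep_nil, pvSub]
  | cons c cs =>
    by_cases hp : k <+: (c :: cs)
    · -- the head matches k: both sides emit t and continue after k
      rw [pvRep_pos k t (c :: cs) hk hp]
      rw [pvSub_target rest t _ hT]
      have hlen : ((c :: cs).drop k.length).length < n := by
        simp at hn ⊢
        cases k with
        | nil => exact absurd rfl hk
        | cons _ _ => simp; omega
      rw [IH _ hlen _ rfl]
      have hfind : ((k, t) :: rest).find? (fun p => p.1.isPrefixOf (c :: cs)) = some (k, t) := by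
        rw [List.find?]
        simp [List.isPrefixOf_iff_prefix.mpr hp]
      have hdrop : cs.drop (k.length - 1) = (c :: cs).drop k.length := by
        cases k with
        | nil => exact absurd rfl hk
        | cons _ _ => simp
      rw [pvSub, hfind]
      simp [hdrop]
    · -- the head does not match k
      rw [pvRep_cons_neg k t c cs hp]
      have hiff : ∀ p ∈ rest, (p.1.isPrefixOf (c :: pvRep k t cs)) = (p.1.isPrefixOf (c :: cs)) := by
        intro p hpmem
        have hpi := pvRep_prefix_iff k t p.1 hk
          (fun q h1 h2 => hC2 p hpmem q h1 h2)
          (fun m h1 h2 => hC3 p hpmem m h1 h2)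
          (c :: cs) hp
        rw [pvRep_cons_neg k t c cs hp] at hpi
        rw [Bool.eq_iff_iff,
          List.isPrefixOf_iff_prefix (l₁ := p.1) (l₂ := (c :: pvRep k t cs)),
          List.isPrefixOf_iff_prefix (l₁ := p.1) (l₂ := (c :: cs))]
        exact hpi
      rw [pvSub]
      rw [find?_congr' _ _ rest hiff]
      have hfind2 : ((k, t) :: rest).find? (fun p => p.1.isPrefixOf (c :: cs)) =
          rest.find? (fun p => p.1.isPrefixOf (c :: cs)) := by
        rw [List.find?]
        simp [(List.isPrefixOf_iff_prefix (l₁ := k)).not.mpr hp]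
      rw [pvSub, hfind2]
      cases hfound : rest.find? (fun p => p.1.isPrefixOf (c :: cs)) with
      | none =>
        have hlen : cs.length < n := by simp at hn; omega
        simp only []
        rw [IH _ hlen cs rfl]
      | some p =>
        obtain ⟨k', t'⟩ := p
        have hmem : (k', t') ∈ rest := List.mem_of_find?_eq_some hfound
        have hpreb : (k'.isPrefixOf (c :: cs)) = true := by
          have := List.find?_some hfound; simpa using this
        have hpre' : k' <+: (c :: cs) := List.isPrefixOf_iff_prefix.mp hpreb
        have hk' : k' ≠ [] := hkr _ hmem
        have hk'len : 1 ≤ k'.length := by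
          cases k' with
          | nil => exact absurd rfl hk'
          | cons _ _ => simp
        have hlk : k'.length ≤ (c :: cs).length := hpre'.length_le
        have hnoocc : ∀ q < k'.length, ¬ k <+: (c :: cs).drop q := by
          intro q hq
          rcases Nat.eq_zero_or_pos q with h0 | h1
          · rw [h0]; exact hp
          · intro habs
            obtain ⟨w, hw⟩ := hpre'
            have hdq : (c :: cs).drop q = k'.drop q ++ w := by
              rw [← hw, List.drop_append_of_le_length (le_of_lt hq)]
            rw [hdq] at habs
            by_cases hol : k.length ≤ k'.length - q
            · exact hC2 _ hmem q h1 hq (Or.inl (prefix_append_short habs (by simp; omega)))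
            · exact hC2 _ hmem q h1 hq (Or.inr
                (List.prefix_of_prefix_length_le (List.prefix_append _ _) habs (by simp; omega)))
        have hskip := pvRep_skip k t k'.length (c :: cs) hlk hnoocc
        rw [pvRep_cons_neg k t c cs hp] at hskip
        have hlk2 : k'.length ≤ cs.length + 1 := by simpa using hlk
        have htake : ((c :: cs).take k'.length).length = k'.length := by
          simp only [List.length_take, List.length_cons]; omega
        have h2 : (c :: pvRep k t cs).drop k'.length = (pvRep k t cs).drop (k'.length - 1) := by
          cases k' with
          | nil => exact absurd rfl hk'
          | cons _ _ => simp
        have hAnil : ((c :: cs).take k'.length).drop k'.length = [] :=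
          List.drop_eq_nil_of_le (le_of_eq htake)
        have hdropRep : (pvRep k t cs).drop (k'.length - 1) = pvRep k t ((c :: cs).drop k'.length) := by
          rw [← h2, hskip, List.drop_append_of_le_length htake.ge, hAnil, List.nil_append]
        have hdropcs : cs.drop (k'.length - 1) = (c :: cs).drop k'.length := by
          cases k' with
          | nil => exact absurd rfl hk'
          | cons _ _ => simp
        have hlen2 : ((c :: cs).drop k'.length).length < n := by
          simp at hn ⊢; omega
        simp only []
        rw [hdropRep, hdropcs, IH _ hlen2 _ rfl]

-- ===== VERDICT =====
theorem localize_size_reason_py_spec : Claim_equal_localize_size_reason_py := by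
  unfold Claim_equal_localize_size_reason_py
  intro reason language _
  unfold Spec_localize_size_reason_py localize_size_reason_py localize_size_reason_py_alt
  by_cases hl : (language == "en") = true
  · simp [hl]
  · simp only [hl, Bool.false_eq_true, if_false]
    have key : (PySem.Str.replace (PySem.Str.replace (PySem.Str.replace (PySem.Str.replace
        (PySem.Str.replace (PySem.Str.replace reason "Chest" "Bust") "Waist" "Talie")
        "Hips" "Șolduri") "Inseam" "Lungime interioară")
        "No body profile measurements saved." "Nu există măsurători salvate în profilul corporal.")
        "No matching size chart entries found." "Nu am găsit intrări compatibile în size chart.").toList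
        = pvSub pvTable reason.toList := by
      simp only [PySem.Str.toList_replace]
      rw [replace_eq_pvRep _ "Chest".toList "Bust".toList (by decide),
        replace_eq_pvRep _ "Waist".toList "Talie".toList (by decide),
        replace_eq_pvRep _ "Hips".toList "Șolduri".toList (by decide),
        replace_eq_pvRep _ "Inseam".toList "Lungime interioară".toList (by decide),
        replace_eq_pvRep _ "No body profile measurements saved.".toList
          "Nu există măsurători salvate în profilul corporal.".toList (by decide),
        replace_eq_pvRep _ "No matching size chart entries found.".toList
          "Nu am găsit intrări compatibile în size chart.".toList (by decide)]
      rw [← pvSub_nil (pvRep "No matching size chart entries found.".toList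
        "Nu am găsit intrări compatibile în size chart.".toList _)]
      rw [pvSub_absorb "No matching size chart entries found.".toList
        "Nu am găsit intrări compatibile în size chart.".toList []
        (by decide) (by decide) (by decide) (by decide) (by decide)]
      rw [pvSub_absorb "No body profile measurements saved.".toList
        "Nu există măsurători salvate în profilul corporal.".toList _
        (by decide) (by decide) (by decide) (by decide) (by decide)]
      rw [pvSub_absorb "Inseam".toList "Lungime interioară".toList _
        (by decide) (by decide) (by decide) (by decide) (by decide)]
      rw [pvSub_absorb "Hips".toList "Șolduri".toList _
        (by decide) (by decide) (by decide) (by decide) (by decide)]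
      rw [pvSub_absorb "Waist".toList "Talie".toList _
        (by decide) (by decide) (by decide) (by decide) (by decide)]
      rw [pvSub_absorb "Chest".toList "Bust".toList _
        (by decide) (by decide) (by decide) (by decide) (by decide)]
      rfl
    rw [← key, String.ofList_toList]
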